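-- pv_equiv track=rewrite | github.com/ToropovDev/TinkoffAlgorithmsAndDataStructures | Contest 11 - Методы решения задач 2/A.py | build_sparse_table
-- ===== SOURCE A (Python) =====
-- from math import log2
--
-- def build_sparse_table(n, parents):
--     log_n = int(log2(n)) + 1
--     sparse_table = [[-1] * log_n for _ in range(n)]
--
--     for i in range(n):
--         sparse_table[i][0] = parents[i - 1]
--
--     for j in range(1, log_n):
--         for i in range(n):
--             if sparse_table[i][j - 1] != -1:
--                 sparse_table[i][j] = sparse_table[sparse_table[i][j - 1]][j - 1]
--
--     return sparse_table
-- ===== SOURCE B (Python) =====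
-- from math import log2
--
-- def build_sparse_table(n, parents):
--     log_n = int(log2(n)) + 1
--
--     def col(j):
--         if j == 0:
--             return [parents[i - 1] for i in range(n)]
--         c = col(j - 1)
--         return [-1 if p == -1 else c[p] for p in c]
--
--     cols = [col(j) for j in range(log_n)]
--     return [[c[i] for c in cols] for i in range(n)]
-- ===== Notes on version B (the rewrite author's own statement) =====
-- stated objective: alternative
-- what changed: A fills a mutable n x log_n table bottom-up with two nested index loops mutating cells in place; B instead defines column j recursively from column j-1 by a self-lookup comprehension (col j = [-1 if p == -1 else c[p] for p in c]) and assembles the result by transposing the list of columns, with no mutation and no 2D table.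
import Mathlib
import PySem

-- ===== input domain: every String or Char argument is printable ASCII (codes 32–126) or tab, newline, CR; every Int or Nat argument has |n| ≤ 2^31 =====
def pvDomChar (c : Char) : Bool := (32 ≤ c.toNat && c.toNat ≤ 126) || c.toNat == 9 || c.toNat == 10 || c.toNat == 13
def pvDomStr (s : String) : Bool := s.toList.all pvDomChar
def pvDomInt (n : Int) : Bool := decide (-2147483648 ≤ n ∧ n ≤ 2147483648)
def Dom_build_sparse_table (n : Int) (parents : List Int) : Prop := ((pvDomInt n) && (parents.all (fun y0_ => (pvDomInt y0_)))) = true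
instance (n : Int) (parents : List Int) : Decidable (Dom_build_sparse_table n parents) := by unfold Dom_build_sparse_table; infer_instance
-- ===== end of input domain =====

-- B replaces A's bottom-up in-place doubling sweep over a mutable n×log_n table by a recursive
-- column definition (col j = col (j-1) looked up in itself) plus a final transpose (objective: alternative).

-- ===== PORT A =====
-- int(log2(n)) = Nat.log2 n.toNat is exact for 1 ≤ n ≤ 2^31; for n ≤ 0 Python's log2 raises (excluded by Pre_).
def build_sparse_table (n : Int) (parents : List Int) : List (List Int) :=
  let log_n : Int := (Nat.log2 n.toNat : Int) + 1
  let t0 : List (List Int) := (PySem.List.pyRange 0 n 1).map (fun _ => List.replicate log_n.toNat (-1))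
  let t1 := (PySem.List.pyRange 0 n 1).foldl (fun t i =>
      PySem.List.pySetD t i (PySem.List.pySetD (PySem.List.pyGetD t i []) 0 (PySem.List.pyGetD parents (i - 1) 0))) t0
  (PySem.List.pyRange 1 log_n 1).foldl (fun t j =>
    (PySem.List.pyRange 0 n 1).foldl (fun t i =>
      if PySem.List.pyGetD (PySem.List.pyGetD t i []) (j - 1) 0 ≠ -1 then
        PySem.List.pySetD t i (PySem.List.pySetD (PySem.List.pyGetD t i []) j
          (PySem.List.pyGetD (PySem.List.pyGetD t (PySem.List.pyGetD (PySem.List.pyGetD t i []) (j - 1) 0) []) (j - 1) 0))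
      else t) t) t1

-- ===== PORT B =====
-- Source B's recursive helper col(j): column j of the table, defined from column j-1 by self-lookup.
def pvCol (n : Int) (parents : List Int) : Nat → List Int
  | 0 => (PySem.List.pyRange 0 n 1).map (fun i => PySem.List.pyGetD parents (i - 1) 0)
  | j+1 => let c := pvCol n parents j
           c.map (fun p => if p = -1 then -1 else PySem.List.pyGetD c p 0)

def build_sparse_table_alt (n : Int) (parents : List Int) : List (List Int) :=
  let log_n : Int := (Nat.log2 n.toNat : Int) + 1
  let cols := (PySem.List.pyRange 0 log_n 1).map (fun j => pvCol n parents j.toNat)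
  (PySem.List.pyRange 0 n 1).map (fun i => cols.map (fun c => PySem.List.pyGetD c i 0))

-- ===== PRECONDITION & SPEC =====
-- Pre_ is exactly where Python A returns normally: n ≥ 1 (math.log2 raises for n ≤ 0), parents long
-- enough and non-empty for the parents[i-1] reads, and every parent value that is read lies in
-- [-n, n) so that the sparse_table[...] lookups never raise IndexError (for n = 1 the doubling
-- loop never runs, so no parent value is ever used as an index and no value bound is needed).
def Pre_build_sparse_table (n : Int) (parents : List Int) : Prop :=
  1 ≤ n ∧ n - 1 ≤ (parents.length : Int) ∧ parents ≠ [] ∧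
  (2 ≤ n →
    (∀ p ∈ parents.take (n.toNat - 1), -n ≤ p ∧ p < n) ∧
    (-n ≤ parents.getLastD 0 ∧ parents.getLastD 0 < n))
instance (n : Int) (parents : List Int) : Decidable (Pre_build_sparse_table n parents) := by
  unfold Pre_build_sparse_table; infer_instance

def pvWitness_build_sparse_table : Int × List Int := (2, [1, -1])

def Spec_build_sparse_table (n : Int) (parents : List Int) (out : List (List Int)) : Prop := out = build_sparse_table_alt n parents
instance (n : Int) (parents : List Int) (out : List (List Int)) : Decidable (Spec_build_sparse_table n parents out) := by unfold Spec_build_sparse_table; infer_instance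

-- ===== CLAIM (what is proved, stated in full; the proofs are below) =====
def Claim_equal_build_sparse_table : Prop := ∀ (n : Int) (parents : List Int), Dom_build_sparse_table n parents → Pre_build_sparse_table n parents → Spec_build_sparse_table n parents (build_sparse_table n parents)

-- ===== LEMMAS AND PROOFS =====

-- the pure table both programs compute: row i, columns ≤ k filled with pvCol values, -1 beyond
def pvRowT (n : Int) (parents : List Int) (k i : Nat) : List Int :=
  (List.range (Nat.log2 n.toNat + 1)).map (fun j => if j ≤ k then (pvCol n parents j).getD i 0 else -1)
def pvTab (n : Int) (parents : List Int) (k : Nat) : List (List Int) :=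
  (List.range n.toNat).map (pvRowT n parents k)

-- Python's wrapped index for -len ≤ p < len
def pvWrap (len : Nat) (p : Int) : Nat := (if p < 0 then p + len else p).toNat

lemma pvWrap_lt (len : Nat) (p : Int) (h1 : -(len : Int) ≤ p) (h2 : p < (len : Int)) (h0 : 0 < len) :
    pvWrap len p < len := by
  unfold pvWrap; split <;> omega

lemma pyGetD_wrap {α : Type} (xs : List α) (p : Int) (d : α)
    (h1 : -(xs.length : Int) ≤ p) (h2 : p < (xs.length : Int)) :
    PySem.List.pyGetD xs p d = xs.getD (pvWrap xs.length p) d := by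
  by_cases hp : 0 ≤ p
  · rw [PySem.List.pyGetD_eq_getElem xs d hp h2]
    have hlt : pvWrap xs.length p < xs.length := by unfold pvWrap; split <;> omega
    rw [List.getD_eq_getElem _ _ hlt]
    unfold pvWrap; congr 1; omega
  · push_neg at hp
    have hk : p = -((-p).toNat : Int) := by omega
    rw [hk, PySem.List.pyGetD_neg_natCast xs (-p).toNat d (by omega) (by omega)]
    have hlt : pvWrap xs.length p < xs.length := by unfold pvWrap; split <;> omega
    rw [← hk, List.getD_eq_getElem _ _ hlt]
    congr 1; unfold pvWrap; split <;> omega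

lemma pvCol_length (n : Int) (parents : List Int) : ∀ j, (pvCol n parents j).length = n.toNat := by
  intro j
  induction j with
  | zero => simp [pvCol, PySem.List.pyRange_one]
  | succ j ih => simp [pvCol, ih]

lemma pvCol_zero_getD (n : Int) (parents : List Int) (i : Nat) (hi : i < n.toNat) :
    (pvCol n parents 0).getD i 0 = PySem.List.pyGetD parents ((i : Int) - 1) 0 := by
  show ((PySem.List.pyRange 0 n 1).map (fun i => PySem.List.pyGetD parents (i - 1) 0)).getD i 0 = _
  rw [PySem.List.pyRange_one, List.map_map, PySem.List.getD_map_range _ _ _ _ (by simpa using hi)]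
  simp

lemma pvCol_succ_getD (n : Int) (parents : List Int) (j : Nat) (i : Nat) (hi : i < n.toNat) :
    (pvCol n parents (j+1)).getD i 0 =
      (if (pvCol n parents j).getD i 0 = -1 then -1
       else PySem.List.pyGetD (pvCol n parents j) ((pvCol n parents j).getD i 0) 0) := by
  have hlen := pvCol_length n parents j
  show ((pvCol n parents j).map _).getD i 0 = _
  rw [List.getD_eq_getElem _ _ (by simp [hlen, hi]), List.getElem_map,
      ← List.getD_eq_getElem (pvCol n parents j) 0 (by omega)]

lemma pvCol_valid (n : Int) (parents : List Int)
    (hn : 1 ≤ n) (hlenp : n - 1 ≤ (parents.length : Int)) (hne : parents ≠ [])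
    (htake : ∀ p ∈ parents.take (n.toNat - 1), -n ≤ p ∧ p < n)
    (hlast : -n ≤ parents.getLastD 0 ∧ parents.getLastD 0 < n) :
    ∀ j, ∀ i < n.toNat, -n ≤ (pvCol n parents j).getD i 0 ∧ (pvCol n parents j).getD i 0 < n := by
  intro j
  induction j with
  | zero =>
    intro i hi
    rw [pvCol_zero_getD n parents i hi]
    rcases Nat.eq_zero_or_pos i with h0 | h0
    · subst h0
      rw [show ((0:Nat) : Int) - 1 = -1 by norm_num, PySem.List.pyGetD_neg_one parents 0 hne]
      rwa [List.getLastD_eq_getLast?, List.getLast?_eq_getLast hne, Option.getD_some] at hlast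
    · have hcast : ((i : Int) - 1) = ((i - 1 : Nat) : Int) := by omega
      rw [hcast, PySem.List.pyGetD_natCast]
      have hlt : i - 1 < parents.length := by omega
      rw [List.getD_eq_getElem _ _ hlt]
      apply htake
      have hlt' : i - 1 < (parents.take (n.toNat - 1)).length := by simp; omega
      have heq : (parents.take (n.toNat - 1))[i-1]'hlt' = parents[i-1] := List.getElem_take
      rw [← heq]
      exact List.getElem_mem _
  | succ j ih =>
    intro i hi
    rw [pvCol_succ_getD n parents j i hi]
    split
    · omega
    · rcases ih i hi with ⟨h1, h2⟩
      have hlen := pvCol_length n parents j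
      have hn' : ((pvCol n parents j).length : Int) = n := by rw [hlen]; omega
      rw [pyGetD_wrap _ _ _ (by omega) (by omega)]
      exact ih _ (by rw [← hlen]; exact pvWrap_lt _ _ (by omega) (by omega) (by omega))

lemma set_map_range {α : Type} (f : Nat → α) (m nn : Nat) (v : α) (h : m < nn) :
    ((List.range nn).map f).set m v = (List.range nn).map (fun i => if i = m then v else f i) := by
  apply List.ext_getElem (by simp)
  intro i h1 h2
  simp only [List.getElem_set, List.getElem_map, List.getElem_range]
  rcases eq_or_ne m i with he | he
  · subst he; simp
  · simp [he, Ne.symm he]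

lemma pvRowT_getD (n : Int) (parents : List Int) (k i j : Nat) (hj : j < Nat.log2 n.toNat + 1) :
    (pvRowT n parents k i).getD j 0 = if j ≤ k then (pvCol n parents j).getD i 0 else -1 := by
  unfold pvRowT
  rw [PySem.List.getD_map_range _ _ _ _ hj]

lemma pvRowT_set (n : Int) (parents : List Int) (k i : Nat) :
    (pvRowT n parents k i).set (k+1) ((pvCol n parents (k+1)).getD i 0) = pvRowT n parents (k+1) i := by
  unfold pvRowT
  apply List.ext_getElem (by simp)
  intro a h1 h2
  simp only [List.getElem_set, List.getElem_map, List.getElem_range]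
  rcases eq_or_ne (k+1) a with he | he
  · subst he; simp
  · rw [if_neg he]
    rcases Nat.lt_or_ge a (k+1) with ha2 | ha2
    · rw [if_pos (by omega), if_pos (by omega)]
    · rw [if_neg (by omega), if_neg (by omega)]

lemma pvRowT_stable (n : Int) (parents : List Int) (k i : Nat) (hi : i < n.toNat)
    (h : (pvCol n parents (k+1)).getD i 0 = -1) :
    pvRowT n parents (k+1) i = pvRowT n parents k i := by
  unfold pvRowT
  apply List.map_congr_left
  intro j _
  rcases Nat.lt_trichotomy j (k+1) with hj | hj | hj
  · rw [if_pos (by omega), if_pos (by omega)]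
  · subst hj; rw [if_pos (le_refl _), if_neg (by omega), h]
  · rw [if_neg (by omega), if_neg (by omega)]

lemma pv_fold1 (n : Int) (parents : List Int) (m : Nat) (hm : m ≤ n.toNat) :
    (List.range m).foldl (fun t (i : Nat) => t.set i ((t.getD i []).set 0 (PySem.List.pyGetD parents ((i : Int) - 1) 0)))
        ((List.range n.toNat).map (fun _ => List.replicate (Nat.log2 n.toNat + 1) (-1)))
    = (List.range n.toNat).map (fun i => if i < m then (List.replicate (Nat.log2 n.toNat + 1) ((-1 : Int))).set 0 (PySem.List.pyGetD parents ((i : Int) - 1) 0) else List.replicate (Nat.log2 n.toNat + 1) (-1)) := by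
  induction m with
  | zero =>
    simp only [List.range_zero, List.foldl_nil]
    apply List.map_congr_left; intro i _; rw [if_neg (by omega)]
  | succ m ih =>
    rw [List.range_succ, List.foldl_append, ih (by omega), List.foldl_cons, List.foldl_nil]
    rw [PySem.List.getD_map_range _ _ _ _ (by omega), if_neg (by omega)]
    rw [set_map_range _ _ _ _ (by omega)]
    apply List.map_congr_left; intro i _
    rcases eq_or_ne i m with he | he
    · subst he; rw [if_pos rfl, if_pos (by omega)]
    · rw [if_neg he]
      rcases Nat.lt_or_ge i m with h2 | h2
      · rw [if_pos h2, if_pos (by omega)]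
      · rw [if_neg (by omega), if_neg (by omega)]

lemma pv_row1 (n : Int) (parents : List Int) (i : Nat) (hi : i < n.toNat) :
    (List.replicate (Nat.log2 n.toNat + 1) ((-1 : Int))).set 0 (PySem.List.pyGetD parents ((i : Int) - 1) 0)
      = pvRowT n parents 0 i := by
  apply List.ext_getElem (by simp [pvRowT])
  intro a h1 h2
  have ha : a < Nat.log2 n.toNat + 1 := by simpa [pvRowT] using h2
  unfold pvRowT
  simp only [List.getElem_set, List.getElem_map, List.getElem_range, List.getElem_replicate]
  rcases Nat.eq_zero_or_pos a with h0 | h0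
  · subst h0
    rw [if_pos rfl, if_pos (le_refl _), pvCol_zero_getD n parents i hi]
  · rw [if_neg (by omega), if_neg (by omega)]

lemma pv_base (n : Int) (parents : List Int) :
    (List.range n.toNat).foldl (fun t (i : Nat) => t.set i ((t.getD i []).set 0 (PySem.List.pyGetD parents ((i : Int) - 1) 0)))
        ((List.range n.toNat).map (fun _ => List.replicate (Nat.log2 n.toNat + 1) (-1)))
    = pvTab n parents 0 := by
  rw [pv_fold1 n parents n.toNat (le_refl _)]
  apply List.map_congr_left; intro i hi
  rw [if_pos (List.mem_range.mp hi), pv_row1 n parents i (List.mem_range.mp hi)]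

lemma pv_inner (n : Int) (parents : List Int) (hn : 1 ≤ n)
    (hval : ∀ j, ∀ i < n.toNat, -n ≤ (pvCol n parents j).getD i 0 ∧ (pvCol n parents j).getD i 0 < n)
    (j' : Nat) (hj : j' < Nat.log2 n.toNat) (m : Nat) (hm : m ≤ n.toNat) :
    (List.range m).foldl (fun t (i : Nat) =>
        if (t.getD i []).getD j' 0 ≠ -1 then
          t.set i ((t.getD i []).set (j'+1) ((PySem.List.pyGetD t ((t.getD i []).getD j' 0) []).getD j' 0))
        else t) (pvTab n parents j')
    = (List.range n.toNat).map (fun i => if i < m then pvRowT n parents (j'+1) i else pvRowT n parents j' i) := by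
  have hnn : (n.toNat : Int) = n := by omega
  induction m with
  | zero =>
    simp only [List.range_zero, List.foldl_nil]
    unfold pvTab
    apply List.map_congr_left; intro i _; rw [if_neg (by omega)]
  | succ m ih =>
    rw [List.range_succ, List.foldl_append, ih (by omega), List.foldl_cons, List.foldl_nil]
    set P := (List.range n.toNat).map (fun i => if i < m then pvRowT n parents (j'+1) i else pvRowT n parents j' i) with hP
    have hlenP : P.length = n.toNat := by simp [hP]
    have hrowm : P.getD m [] = pvRowT n parents j' m := by
      rw [hP, PySem.List.getD_map_range _ _ _ _ (by omega), if_neg (by omega)]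
    have hprev : (pvRowT n parents j' m).getD j' 0 = (pvCol n parents j').getD m 0 := by
      rw [pvRowT_getD n parents j' m j' (by omega), if_pos (le_refl _)]
    rcases hval j' m (by omega) with ⟨hv1, hv2⟩
    by_cases hp : (pvCol n parents j').getD m 0 = -1
    · rw [if_neg (by rw [hrowm, hprev]; simp only [ne_eq, not_not]; exact hp)]
      apply List.map_congr_left; intro i _
      rcases eq_or_ne i m with he | he
      · subst he
        rw [if_neg (by omega), if_pos (by omega)]
        exact (pvRowT_stable n parents j' i (by omega)
          (by rw [pvCol_succ_getD n parents j' i (by omega), if_pos hp])).symm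
      · rcases Nat.lt_or_ge i m with h2 | h2
        · rw [if_pos h2, if_pos (by omega)]
        · rw [if_neg (by omega), if_neg (by omega)]
    · rw [if_pos (by rw [hrowm, hprev]; simpa using hp)]
      have hwrap : PySem.List.pyGetD P ((pvCol n parents j').getD m 0) [] =
          P.getD (pvWrap n.toNat ((pvCol n parents j').getD m 0)) [] := by
        rw [pyGetD_wrap P _ [] (by rw [hlenP]; omega) (by rw [hlenP]; omega), hlenP]
      have hwlt : pvWrap n.toNat ((pvCol n parents j').getD m 0) < n.toNat :=
        pvWrap_lt _ _ (by omega) (by omega) (by omega)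
      have hval2 : (PySem.List.pyGetD P ((pvCol n parents j').getD m 0) []).getD j' 0 =
          (pvCol n parents (j'+1)).getD m 0 := by
        rw [hwrap, hP, PySem.List.getD_map_range _ _ _ _ hwlt]
        rw [pvCol_succ_getD n parents j' m (by omega), if_neg hp,
            pyGetD_wrap _ _ _ (by rw [pvCol_length]; omega) (by rw [pvCol_length]; omega),
            pvCol_length]
        split
        · rw [pvRowT_getD n parents (j'+1) _ j' (by omega), if_pos (by omega)]
        · rw [pvRowT_getD n parents j' _ j' (by omega), if_pos (le_refl _)]
      rw [hrowm, hprev, hval2, pvRowT_set n parents j' m, hP, set_map_range _ _ _ _ (by omega)]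
      apply List.map_congr_left; intro i _
      rcases eq_or_ne i m with he | he
      · subst he; rw [if_pos rfl, if_pos (by omega)]
      · rw [if_neg he]
        rcases Nat.lt_or_ge i m with h2 | h2
        · rw [if_pos h2, if_pos (by omega)]
        · rw [if_neg (by omega), if_neg (by omega)]

lemma pv_outer (n : Int) (parents : List Int) (hn : 1 ≤ n)
    (hval2 : 2 ≤ n → ∀ j, ∀ i < n.toNat, -n ≤ (pvCol n parents j).getD i 0 ∧ (pvCol n parents j).getD i 0 < n)
    (k : Nat) (hk : k ≤ Nat.log2 n.toNat) :
    (List.range k).foldl (fun t (j' : Nat) =>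
        (List.range n.toNat).foldl (fun t (i : Nat) =>
          if (t.getD i []).getD j' 0 ≠ -1 then
            t.set i ((t.getD i []).set (j'+1) ((PySem.List.pyGetD t ((t.getD i []).getD j' 0) []).getD j' 0))
          else t) t) (pvTab n parents 0)
    = pvTab n parents k := by
  induction k with
  | zero => simp
  | succ k ih =>
    rw [List.range_succ, List.foldl_append, ih (by omega), List.foldl_cons, List.foldl_nil]
    have h2 : 2 ≤ n := by
      by_contra hlt
      have h1 : n.toNat = 0 ∨ n.toNat = 1 := by omega
      have : Nat.log2 n.toNat = 0 := by rcases h1 with h | h <;> rw [h] <;> decide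
      omega
    rw [pv_inner n parents hn (hval2 h2) k (by omega) n.toNat (le_refl _)]
    unfold pvTab
    apply List.map_congr_left; intro i hi
    rw [if_pos (List.mem_range.mp hi)]

lemma pvB_eq (n : Int) (parents : List Int) :
    build_sparse_table_alt n parents = pvTab n parents (Nat.log2 n.toNat) := by
  have hL : ((Nat.log2 n.toNat : Int) + 1).toNat = Nat.log2 n.toNat + 1 := by omega
  unfold build_sparse_table_alt pvTab
  simp only [PySem.List.pyRange_one, sub_zero, zero_add, List.map_map, Function.comp_def, hL,
    Int.toNat_natCast]
  apply List.map_congr_left; intro i hi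
  unfold pvRowT
  apply List.map_congr_left; intro j hj
  have hj' : j < Nat.log2 n.toNat + 1 := List.mem_range.mp hj
  simp only [PySem.List.pyGetD_natCast]
  rw [if_pos (by omega)]

lemma pvA_eq (n : Int) (parents : List Int) (hn : 1 ≤ n)
    (hval2 : 2 ≤ n → ∀ j, ∀ i < n.toNat, -n ≤ (pvCol n parents j).getD i 0 ∧ (pvCol n parents j).getD i 0 < n) :
    build_sparse_table n parents = pvTab n parents (Nat.log2 n.toNat) := by
  have hL : ((Nat.log2 n.toNat : Int) + 1).toNat = Nat.log2 n.toNat + 1 := by omega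
  have hL1 : ((Nat.log2 n.toNat : Int) + 1 - 1).toNat = Nat.log2 n.toNat := by omega
  have hc1 : ∀ k : Nat, (1 + (k : Int)) = ((k+1 : Nat) : Int) := by intro k; push_cast; ring
  have hc2 : ∀ k : Nat, ((k+1 : Nat) : Int) - 1 = (k : Int) := by intro k; push_cast; ring
  unfold build_sparse_table
  simp only [PySem.List.pyRange_one, sub_zero, zero_add, List.foldl_map, List.map_map, hL, hL1,
    hc1, hc2, PySem.List.pyGetD_natCast, PySem.List.pySetD_natCast, PySem.List.pyGetD_zero,
    PySem.List.pySetD_of_nonneg, Int.toNat_natCast, Int.toNat_zero, Int.natCast_nonneg, le_refl,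
    Function.comp_def]
  rw [pv_base n parents]
  exact pv_outer n parents hn hval2 (Nat.log2 n.toNat) (le_refl _)

-- ===== VERDICT (by name: the statement is the Claim_ definition above) =====
theorem build_sparse_table_spec : Claim_equal_build_sparse_table := by
  intro n parents _ hpre
  obtain ⟨hn, hlenp, hne, hcond⟩ := hpre
  unfold Spec_build_sparse_table
  rw [pvA_eq n parents hn
        (fun h2 => pvCol_valid n parents hn hlenp hne (hcond h2).1 (hcond h2).2),
      pvB_eq n parents]
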